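-- pv_equiv track=rewrite | github.com/naiy123/translate-xls | translate_app.py | group_by_rows
-- ===== SOURCE A (Python) =====
-- from collections import defaultdict
--
-- BATCH_SIZE = 25
--
-- def group_by_rows(keys, max_cells=BATCH_SIZE):
--     row_groups = defaultdict(list)
--     for row, col in keys:
--         row_groups[row].append((row, col))
--     batches = []
--     current_batch = []
--     for row in sorted(row_groups.keys()):
--         row_keys = row_groups[row]
--         if current_batch and len(current_batch) + len(row_keys) > max_cells:
--             batches.append(current_batch)
--             current_batch = []
--         current_batch.extend(row_keys)
--     if current_batch:
--         batches.append(current_batch)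
--     return batches
-- ===== SOURCE B (Python) =====
-- BATCH_SIZE = 25
--
-- def group_by_rows(keys, max_cells=BATCH_SIZE):
--     # Sort the cells by row (stable), then scan runs of equal rows instead of
--     # grouping into a dict first.
--     cells = sorted(((row, col) for row, col in keys), key=lambda rc: rc[0])
--     batches = []
--     current_batch = []
--     while cells:
--         row = cells[0][0]
--         run = 1
--         while run < len(cells) and cells[run][0] == row:
--             run += 1
--         row_keys = cells[:run]
--         cells = cells[run:]
--         if current_batch and len(current_batch) + len(row_keys) > max_cells:
--             batches.append(current_batch)
--             current_batch = []
--         current_batch.extend(row_keys)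
--     if current_batch:
--         batches.append(current_batch)
--     return batches
-- ===== Notes on version B (the rewrite author's own statement) =====
-- stated objective: alternative
-- what changed: Replaces the defaultdict row-grouping followed by sorting the dict keys with a single stable sort of the cells by row and one linear scan that detects runs of equal rows and feeds them to the same greedy batching.
import Mathlib
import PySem

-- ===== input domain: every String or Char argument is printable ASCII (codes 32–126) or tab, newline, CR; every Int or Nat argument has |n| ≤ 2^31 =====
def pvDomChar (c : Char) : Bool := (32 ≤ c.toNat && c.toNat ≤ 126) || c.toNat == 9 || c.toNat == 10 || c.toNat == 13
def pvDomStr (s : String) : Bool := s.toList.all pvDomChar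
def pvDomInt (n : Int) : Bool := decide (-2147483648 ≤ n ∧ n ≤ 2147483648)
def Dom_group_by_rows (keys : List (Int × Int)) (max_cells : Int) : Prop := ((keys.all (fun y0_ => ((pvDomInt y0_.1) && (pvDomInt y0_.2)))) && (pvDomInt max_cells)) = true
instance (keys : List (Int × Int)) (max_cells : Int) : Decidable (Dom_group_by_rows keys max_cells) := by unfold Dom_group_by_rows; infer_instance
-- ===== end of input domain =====

-- B replaces A's dict-grouping + key-sort by a stable sort of the cells followed by a
-- single scan over runs of equal rows (same greedy batching); objective: alternative decomposition.


-- ===== PORT A =====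
def group_by_rows (keys : List (Int × Int)) (max_cells : Int) : List (List (Int × Int)) :=
  -- row_groups = defaultdict(list); for row, col in keys: row_groups[row].append((row, col))
  let row_groups : PySem.Dict Int (List (Int × Int)) :=
    keys.foldl (fun d rc => d.modify rc.1 [] (fun l => l ++ [(rc.1, rc.2)])) PySem.Dict.empty
  -- for row in sorted(row_groups.keys()): …
  let res :=
    (PySem.List.sorted row_groups.keys (fun x => x)).foldl
      (fun (st : List (List (Int × Int)) × List (Int × Int)) row =>
        let row_keys := row_groups.getD row []
        if st.2 ≠ [] ∧ (st.2.length : Int) + (row_keys.length : Int) > max_cells then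
          (st.1 ++ [st.2], [] ++ row_keys)
        else
          (st.1, st.2 ++ row_keys))
      ([], [])
  if res.2 ≠ [] then res.1 ++ [res.2] else res.1

-- ===== PORT B =====
-- the 'while cells:' loop of B; the inner 'while run < len(cells) and cells[run][0] == row'
-- scan is: cells[1:run] = maximal prefix of the tail with the same row, cells[run:] = the rest
def pvAltLoop (max_cells : Int) (cells : List (Int × Int))
    (batches : List (List (Int × Int))) (current_batch : List (Int × Int)) :
    List (List (Int × Int)) :=
  match cells with
  | [] => if current_batch ≠ [] then batches ++ [current_batch] else batches
  | x :: rest =>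
    let grp := rest.takeWhile (fun y => y.1 == x.1)
    let row_keys := x :: grp
    let cells' := rest.dropWhile (fun y => y.1 == x.1)
    if current_batch ≠ [] ∧ (current_batch.length : Int) + (row_keys.length : Int) > max_cells then
      pvAltLoop max_cells cells' (batches ++ [current_batch]) row_keys
    else
      pvAltLoop max_cells cells' batches (current_batch ++ row_keys)
termination_by cells.length
decreasing_by
  all_goals
    simp only [List.length_cons]
    exact Nat.lt_succ_of_le (List.length_dropWhile_le _ _)

def group_by_rows_alt (keys : List (Int × Int)) (max_cells : Int) : List (List (Int × Int)) :=
  -- cells = sorted(((row, col) for row, col in keys), key=lambda rc: rc[0])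
  let cells := PySem.List.sorted (keys.map (fun rc => (rc.1, rc.2))) (fun rc => rc.1)
  pvAltLoop max_cells cells [] []

-- ===== PRECONDITION & SPEC =====
def Spec_group_by_rows (keys : List (Int × Int)) (max_cells : Int) (out : List (List (Int × Int))) : Prop := out = group_by_rows_alt keys max_cells
instance (keys : List (Int × Int)) (max_cells : Int) (out : List (List (Int × Int))) : Decidable (Spec_group_by_rows keys max_cells out) := by unfold Spec_group_by_rows; infer_instance

-- ===== CLAIM (what is proved, stated in full; the proofs are below) =====
def Claim_equal_group_by_rows : Prop := ∀ (keys : List (Int × Int)) (max_cells : Int), Dom_group_by_rows keys max_cells → Spec_group_by_rows keys max_cells (group_by_rows keys max_cells)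

-- ===== LEMMAS AND PROOFS =====

-- the cells of row r, in appearance order
def pvCells (keys : List (Int × Int)) (r : Int) : List (Int × Int) :=
  keys.filter (fun p => p.1 == r)

-- the distinct rows, sorted increasingly
def pvRows (keys : List (Int × Int)) : List Int :=
  PySem.List.sorted (PySem.Set.ofList (keys.map Prod.fst)) (fun x => x)

lemma pvRows_pairwise (keys : List (Int × Int)) : (pvRows keys).Pairwise (· < ·) :=
  PySem.List.sorted_ofList_pairwise_lt _

lemma mem_pvRows {keys : List (Int × Int)} {r : Int} :
    r ∈ pvRows keys ↔ r ∈ keys.map Prod.fst := by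
  simp [pvRows, PySem.List.mem_sorted, PySem.Set.mem_ofList]

lemma mem_pvCells_fst {keys : List (Int × Int)} {r : Int} {y : Int × Int}
    (h : y ∈ pvCells keys r) : y.1 = r := by
  have := List.of_mem_filter h
  simpa using this

lemma pvCells_ne_nil {keys : List (Int × Int)} {r : Int} (h : r ∈ keys.map Prod.fst) :
    pvCells keys r ≠ [] := by
  obtain ⟨p, hp, hr⟩ := List.mem_map.mp h
  intro hnil
  have : p ∈ pvCells keys r := List.mem_filter.mpr ⟨hp, by simp [hr]⟩
  simp [hnil] at this

lemma mem_flat_fst {keys : List (Int × Int)} {rs : List Int} {y : Int × Int}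
    (h : y ∈ rs.flatMap (pvCells keys)) : y.1 ∈ rs := by
  obtain ⟨r, hr, hy⟩ := List.mem_flatMap.mp h
  simpa [mem_pvCells_fst hy] using hr


lemma dropWhile_head_false {α : Type} {p : α → Bool} :
    ∀ {l : List α} {y : α} {ys : List α}, l.dropWhile p = y :: ys → p y = false := by
  intro l
  induction l with
  | nil => intro y ys h; simp [List.dropWhile] at h
  | cons a l ih =>
    intro y ys h
    by_cases hpa : p a
    · exact ih (by simpa [List.dropWhile, hpa] using h)
    · rw [List.dropWhile_cons_of_neg hpa] at h
      cases h; simpa using hpa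

lemma insertBy_split {α : Type} (b : α → α → Bool) (x : α) :
    ∀ (P M : List α), (∀ y ∈ P, b x y = false) → (∀ y ∈ M, b x y = true) →
    PySem.List.insertBy b x (P ++ M) = P ++ x :: M := by
  intro P
  induction P with
  | nil =>
    intro M _ hM
    cases M with
    | nil => simp [PySem.List.insertBy]
    | cons y ys => simp [PySem.List.insertBy, hM y (by simp)]
  | cons p P ih =>
    intro M hP hM
    have hp : b x p = false := hP p (by simp)
    simp only [List.cons_append, PySem.List.insertBy, hp]
    simp [ih M (fun y hy => hP y (by simp [hy])) hM]

-- L1: the grouping dict's lookups are the per-row filters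
lemma getD_rowGroups (keys : List (Int × Int)) (r : Int) :
    (keys.foldl (fun d rc => d.modify rc.1 [] (fun l => l ++ [(rc.1, rc.2)]))
      (PySem.Dict.empty : PySem.Dict Int (List (Int × Int)))).getD r [] = pvCells keys r := by
  have h :
      (keys.map (fun p => (p.1, p))).foldl
        (fun (d : PySem.Dict Int (List (Int × Int))) q => d.modify q.1 [] (fun l => l ++ [q.2]))
        PySem.Dict.empty
      = keys.foldl (fun d rc => d.modify rc.1 [] (fun l => l ++ [(rc.1, rc.2)]))
          PySem.Dict.empty := by
    rw [List.foldl_map]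
  rw [← h, PySem.Dict.getD_foldl_modify_append]
  simp [pvCells, List.filter_map, Function.comp_def]

-- L2: the grouping dict's keys are the distinct rows in appearance order
lemma keys_rowGroups (keys : List (Int × Int)) :
    (keys.foldl (fun d rc => d.modify rc.1 [] (fun l => l ++ [(rc.1, rc.2)]))
      (PySem.Dict.empty : PySem.Dict Int (List (Int × Int)))).keys
    = PySem.Set.ofList (keys.map Prod.fst) := by
  rw [PySem.Dict.keys_foldl_modify_key keys Prod.fst [] (fun _ rc => (fun l => l ++ [(rc.1, rc.2)]))]
  simp [PySem.Dict.keys_empty, PySem.Set.update_nil_left]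

lemma pvCells_append (keys : List (Int × Int)) (x : Int × Int) (r : Int) :
    pvCells (keys ++ [x]) r = pvCells keys r ++ (if x.1 = r then [x] else []) := by
  have hfx : List.filter (fun p : Int × Int => p.1 == r) [x] = (if x.1 = r then [x] else []) := by
    by_cases h : x.1 = r <;> simp [h]
  simp [pvCells, List.filter_append, hfx]

-- L3: the stable sort by row is the sorted distinct rows' filters, concatenated
lemma sorted_eq_flat (keys : List (Int × Int)) :
    PySem.List.sorted keys (fun rc => rc.1) = (pvRows keys).flatMap (pvCells keys) := by
  induction keys using List.reverseRecOn with
  | nil => simp [pvRows, PySem.List.sorted, PySem.Set.ofList]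
  | append_singleton keys x ih =>
    have hsorted : PySem.List.sorted (keys ++ [x]) (fun rc : Int × Int => rc.1)
        = PySem.List.insertBy (fun a b : Int × Int => decide (a.1 < b.1)) x
            (PySem.List.sorted keys (fun rc => rc.1)) := by
      rw [PySem.List.sorted_eq_foldl_insertBy, PySem.List.sorted_eq_foldl_insertBy,
        List.foldl_append]
      rfl
    rw [hsorted, ih]
    have hinc : (pvRows keys).Pairwise (· < ·) := pvRows_pairwise keys
    set t := (pvRows keys).takeWhile (fun r => decide (r < x.1)) with ht
    set d := (pvRows keys).dropWhile (fun r => decide (r < x.1)) with hd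
    have htd : pvRows keys = t ++ d := (List.takeWhile_append_dropWhile).symm
    have hT : ∀ r ∈ t, r < x.1 := fun r h => by simpa using List.mem_takeWhile_imp h
    have hpwtd : (t ++ d).Pairwise (· < ·) := htd ▸ hinc
    have hpwd : d.Pairwise (· < ·) := (List.pairwise_append.mp hpwtd).2.1
    have hpwt : t.Pairwise (· < ·) := (List.pairwise_append.mp hpwtd).1
    have hD : ∀ r ∈ d, x.1 ≤ r := by
      cases hdc : d with
      | nil => simp
      | cons h d' =>
        have hh : x.1 ≤ h := by
          have hf := dropWhile_head_false (hd.symm.trans hdc)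
          simpa using hf
        intro r hr
        rcases (by simpa [hdc] using hr : r = h ∨ r ∈ d') with rfl | hr'
        · exact hh
        · have : h < r := (List.pairwise_cons.mp (hdc ▸ hpwd)).1 r hr'
          omega
    by_cases hx : x.1 ∈ keys.map Prod.fst
    -- Case 1: the new cell's row already occurs
    · have hxrs : x.1 ∈ pvRows keys := mem_pvRows.mpr hx
      have hxnt : x.1 ∉ t := fun h => by have := hT _ h; omega
      have hxd : x.1 ∈ d := by
        rcases (by simpa [htd] using hxrs : x.1 ∈ t ∨ x.1 ∈ d) with h | h
        · exact absurd h hxnt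
        · exact h
      obtain ⟨d', hdc⟩ : ∃ d', d = x.1 :: d' := by
        cases hdc : d with
        | nil => rw [hdc] at hxd; simp at hxd
        | cons h d' =>
          have hh : x.1 ≤ h := hD h (by rw [hdc]; simp)
          rcases (by simpa [hdc] using hxd : x.1 = h ∨ x.1 ∈ d') with rfl | hmem'
          · exact ⟨d', rfl⟩
          · have : h < x.1 := (List.pairwise_cons.mp (hdc ▸ hpwd)).1 _ hmem'
            omega
      have hd' : ∀ r ∈ d', x.1 < r := (List.pairwise_cons.mp (hdc ▸ hpwd)).1
      have hrows' : pvRows (keys ++ [x]) = pvRows keys := by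
        unfold pvRows
        rw [List.map_append, List.map_singleton, PySem.Set.ofList_append_singleton,
          PySem.Set.add_of_mem ((PySem.Set.mem_ofList _ _).mpr hx)]
      rw [hrows', htd, hdc]
      -- right-hand side: only the x.1-block changes, it gains x at its end
      have hre : (t ++ x.1 :: d').flatMap (pvCells (keys ++ [x]))
          = t.flatMap (pvCells keys) ++ ((pvCells keys x.1 ++ [x]) ++ d'.flatMap (pvCells keys)) := by
        rw [List.flatMap_append, List.flatMap_cons]
        have h1 : t.flatMap (pvCells (keys ++ [x])) = t.flatMap (pvCells keys) := by
          simp only [List.flatMap_def]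
          refine congrArg List.flatten (List.map_congr_left fun r hr => ?_)
          rw [pvCells_append]
          have : x.1 ≠ r := by have := hT r hr; omega
          simp [this]
        have h2 : d'.flatMap (pvCells (keys ++ [x])) = d'.flatMap (pvCells keys) := by
          simp only [List.flatMap_def]
          refine congrArg List.flatten (List.map_congr_left fun r hr => ?_)
          rw [pvCells_append]
          have : x.1 ≠ r := by have := hd' r hr; omega
          simp [this]
        rw [h1, h2, pvCells_append]
        simp
      rw [hre]
      -- left-hand side: insertBy passes the ≤-blocks and stops at the >-blocks
      rw [List.flatMap_append, List.flatMap_cons, ← List.append_assoc]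
      rw [insertBy_split _ x (t.flatMap (pvCells keys) ++ pvCells keys x.1)
            (d'.flatMap (pvCells keys))
            (by
              intro y hy
              rcases List.mem_append.mp hy with h | h
              · have : y.1 ∈ t := mem_flat_fst h
                have := hT _ this
                simp; omega
              · have : y.1 = x.1 := mem_pvCells_fst h
                simp; omega)
            (by
              intro y hy
              have : y.1 ∈ d' := mem_flat_fst hy
              have := hd' _ this
              simpa using this)]
      simp
    -- Case 2: the new cell's row is fresh
    · have hxd : ∀ r ∈ d, x.1 < r := by
        intro r hr
        have hle := hD r hr
        have hrk : r ∈ keys.map Prod.fst := mem_pvRows.mp (htd ▸ List.mem_append_right t hr)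
        have : r ≠ x.1 := fun h => hx (h ▸ hrk)
        omega
      have hcx : pvCells keys x.1 = [] := by
        rw [pvCells, List.filter_eq_nil_iff]
        intro p hp hpe
        exact hx (List.mem_map.mpr ⟨p, hp, by simpa using hpe⟩)
      have hrows' : pvRows (keys ++ [x]) = t ++ x.1 :: d := by
        unfold pvRows
        rw [List.map_append, List.map_singleton, PySem.Set.ofList_append_singleton,
          PySem.Set.add_of_not_mem (fun h => hx ((PySem.Set.mem_ofList _ _).mp h))]
        refine PySem.List.sorted_eq_of_perm_of_pairwise_lt _ _ _ ?_ ?_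
        · have hperm1 : (t ++ d).Perm (PySem.Set.ofList (keys.map Prod.fst)) := by
            rw [← htd]; exact PySem.List.sorted_perm _ _ _
          refine List.Perm.trans List.perm_middle ?_
          refine List.Perm.trans (hperm1.cons x.1) ?_
          exact (List.perm_append_singleton _ _).symm
        · refine List.pairwise_append.mpr ⟨hpwt, ?_, ?_⟩
          · exact List.pairwise_cons.mpr ⟨hxd, hpwd⟩
          · intro a ha b hb
            have hat := hT a ha
            rcases (by simpa using hb : b = x.1 ∨ b ∈ d) with rfl | hbd
            · exact hat
            · have := hxd b hbd; omega
      rw [hrows', htd]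
      have hre : (t ++ x.1 :: d).flatMap (pvCells (keys ++ [x]))
          = t.flatMap (pvCells keys) ++ ([x] ++ d.flatMap (pvCells keys)) := by
        rw [List.flatMap_append, List.flatMap_cons]
        have h1 : t.flatMap (pvCells (keys ++ [x])) = t.flatMap (pvCells keys) := by
          simp only [List.flatMap_def]
          refine congrArg List.flatten (List.map_congr_left fun r hr => ?_)
          rw [pvCells_append]
          have : x.1 ≠ r := by have := hT r hr; omega
          simp [this]
        have h2 : d.flatMap (pvCells (keys ++ [x])) = d.flatMap (pvCells keys) := by
          simp only [List.flatMap_def]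
          refine congrArg List.flatten (List.map_congr_left fun r hr => ?_)
          rw [pvCells_append]
          have : x.1 ≠ r := by have := hxd r hr; omega
          simp [this]
        rw [h1, h2, pvCells_append]
        simp [hcx]
      rw [hre]
      rw [List.flatMap_append]
      rw [insertBy_split _ x (t.flatMap (pvCells keys)) (d.flatMap (pvCells keys))
            (by
              intro y hy
              have : y.1 ∈ t := mem_flat_fst hy
              have := hT _ this
              simp; omega)
            (by
              intro y hy
              have : y.1 ∈ d := mem_flat_fst hy
              have := hxd _ this
              simpa using this)]
      simp

-- L4: B's run-scanning loop is A's fold over the sorted distinct rows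
lemma altLoop_flat (m : Int) (keys : List (Int × Int)) :
    ∀ (rs : List Int), rs.Pairwise (· < ·) → (∀ r ∈ rs, r ∈ keys.map Prod.fst) →
    ∀ (batches : List (List (Int × Int))) (current : List (Int × Int)),
    pvAltLoop m (rs.flatMap (pvCells keys)) batches current
    = (let res := rs.foldl
        (fun (st : List (List (Int × Int)) × List (Int × Int)) row =>
          let row_keys := pvCells keys row
          if st.2 ≠ [] ∧ (st.2.length : Int) + (row_keys.length : Int) > m then
            (st.1 ++ [st.2], [] ++ row_keys)
          else
            (st.1, st.2 ++ row_keys))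
        (batches, current);
       if res.2 ≠ [] then res.1 ++ [res.2] else res.1) := by
  intro rs
  induction rs with
  | nil => intro _ _ batches current; simp [pvAltLoop]
  | cons r rs ih =>
    intro hpw hmem batches current
    have hlt : ∀ r' ∈ rs, r < r' := (List.pairwise_cons.mp hpw).1
    have hpw' : rs.Pairwise (· < ·) := (List.pairwise_cons.mp hpw).2
    have hmem' : ∀ r' ∈ rs, r' ∈ keys.map Prod.fst := fun r' h => hmem r' (by simp [h])
    obtain ⟨p, cr, hC⟩ : ∃ p cr, pvCells keys r = p :: cr := by
      cases h : pvCells keys r with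
      | nil => exact absurd h (pvCells_ne_nil (hmem r (by simp)))
      | cons p cr => exact ⟨p, cr, rfl⟩
    have hp1 : p.1 = r := mem_pvCells_fst (y := p) (by rw [hC]; simp)
    have hcr : ∀ y ∈ cr, y.1 = r := fun y hy => mem_pvCells_fst (by rw [hC]; simp [hy])
    have hflat : (r :: rs).flatMap (pvCells keys) = p :: (cr ++ rs.flatMap (pvCells keys)) := by
      simp [hC]
    have hheadflat : ∀ q ∈ (rs.flatMap (pvCells keys)), (q.1 == p.1) = false := by
      intro q hq
      have : q.1 ∈ rs := mem_flat_fst hq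
      have := hlt _ this
      simp [hp1]; omega
    have htw : (cr ++ rs.flatMap (pvCells keys)).takeWhile (fun y => y.1 == p.1) = cr := by
      rw [List.takeWhile_append]
      have h1 : cr.takeWhile (fun y => y.1 == p.1) = cr :=
        List.takeWhile_eq_self_iff.mpr (fun y hy => by simp [hcr y hy, hp1])
      rw [h1]
      simp only []
      cases hf : rs.flatMap (pvCells keys) with
      | nil => simp
      | cons q qs =>
        have : (q.1 == p.1) = false := hheadflat q (by rw [hf]; simp)
        simp [this]
    have hdw : (cr ++ rs.flatMap (pvCells keys)).dropWhile (fun y => y.1 == p.1)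
        = rs.flatMap (pvCells keys) := by
      rw [List.dropWhile_append]
      have h1 : cr.dropWhile (fun y => y.1 == p.1) = [] := by
        rw [List.dropWhile_eq_nil_iff]
        intro y hy; simp [hcr y hy, hp1]
      rw [h1]
      simp only [List.isEmpty_nil]
      cases hf : rs.flatMap (pvCells keys) with
      | nil => simp
      | cons q qs =>
        have : (q.1 == p.1) = false := hheadflat q (by rw [hf]; simp)
        simp [this]
    rw [hflat, pvAltLoop]
    simp only [htw, hdw]
    rw [← hC]
    rw [List.foldl_cons]
    by_cases hcond : current ≠ [] ∧ (current.length : Int) + ((pvCells keys r).length : Int) > m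
    · rw [if_pos hcond]
      have := ih hpw' hmem' (batches ++ [current]) (pvCells keys r)
      simp only [this]
      simp [hcond]
    · rw [if_neg hcond]
      have := ih hpw' hmem' batches (current ++ pvCells keys r)
      simp only [this]
      simp [hcond]


-- ===== VERDICT (by name: the statement is the Claim_ definition above) =====
theorem group_by_rows_spec : Claim_equal_group_by_rows := by
  intro keys max_cells _
  unfold Spec_group_by_rows
  have hmapid : keys.map (fun rc : Int × Int => (rc.1, rc.2)) = keys := by simp
  simp only [group_by_rows, group_by_rows_alt, hmapid, getD_rowGroups, keys_rowGroups]
  rw [sorted_eq_flat]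
  rw [altLoop_flat max_cells keys (pvRows keys) (pvRows_pairwise keys)
        (fun r h => mem_pvRows.mp h) [] []]
  rfl
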